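-- pv_equiv track=rewrite | github.com/ryong9rrr/coding-test-python | 자료구조_큐, 우선순위 큐/프로그래머스lv2-스킬트리.py | check_skill
-- ===== SOURCE A (Python) =====
-- from collections import deque, defaultdict
-- from collections import deque
--
-- def check_skill(skill, skill_tree):
--     # 선행스킬목록을 큐에 담음
--     skill_q = deque()
--     for s in skill:
--         skill_q.append(s)
--
--     # 제시된 스킬트리 중 선행스킬목록에 있는 스킬만 큐에 담음
--     q = deque()
--     for s in skill_tree:
--         if s in skill:
--             q.append(s)
--
--     # 제시된 스킬트리 중 선행스킬목록에 있는 스킬만 담은 큐가 비었다?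
--     # -> 아무거나 막찍어도 가능한 스킬트리임 -> return 1
--     # 그런데 이 코드는 없어도 됨 (while skill_q and q 이므로)
--     if not q:
--         return 1
--
--     while skill_q and q:
--         if skill_q.popleft() != q.popleft():
--             return 0
--     return 1
-- ===== SOURCE B (Python) =====
-- def check_skill(skill, skill_tree):
--     filtered = ''.join(s for s in skill_tree if s in skill)
--     return 1 if skill.startswith(filtered) or filtered.startswith(skill) else 0
-- ===== Notes on version B (the rewrite author's own statement) =====
-- stated objective: simpler
-- what changed: Replaces the dual-deque lockstep popping loop with building the filtered string once and a symmetric string prefix test (startswith both ways).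
import Mathlib
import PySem

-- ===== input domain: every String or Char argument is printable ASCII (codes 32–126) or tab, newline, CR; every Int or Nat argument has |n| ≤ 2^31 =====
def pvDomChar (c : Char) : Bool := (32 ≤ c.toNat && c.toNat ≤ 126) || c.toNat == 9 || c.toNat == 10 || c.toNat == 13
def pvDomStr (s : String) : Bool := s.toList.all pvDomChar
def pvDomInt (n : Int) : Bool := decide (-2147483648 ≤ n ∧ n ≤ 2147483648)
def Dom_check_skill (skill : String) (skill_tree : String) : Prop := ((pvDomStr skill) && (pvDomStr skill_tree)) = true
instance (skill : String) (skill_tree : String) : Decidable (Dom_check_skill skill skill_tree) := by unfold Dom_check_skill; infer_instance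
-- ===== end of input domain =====

-- B replaces A's dual-deque lockstep popping loop with a filtered string and a symmetric startswith prefix test (simpler).
-- ===== PORT A =====
-- the while-loop popping from both deques, as structural recursion on the two lists
def check_skill_loop : List Char → List Char → Int
  | [], _ => 1
  | _ :: _, [] => 1
  | a :: as, b :: bs => if a ≠ b then 0 else check_skill_loop as bs

def check_skill (skill : String) (skill_tree : String) : Int :=
  let skill_q : List Char := skill.toList
  let q : List Char := skill_tree.toList.filter (fun s => PySem.Str.isIn (String.ofList [s]) skill)
  if q = [] then 1
  else check_skill_loop skill_q q

-- ===== PORT B =====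
def check_skill_alt (skill : String) (skill_tree : String) : Int :=
  let filtered : String := String.ofList (skill_tree.toList.filter (fun s => PySem.Str.isIn (String.ofList [s]) skill))
  if PySem.Str.startswith skill filtered || PySem.Str.startswith filtered skill then 1 else 0

-- ===== PRECONDITION & SPEC =====
def Spec_check_skill (skill : String) (skill_tree : String) (out : Int) : Prop := out = check_skill_alt skill skill_tree
instance (skill : String) (skill_tree : String) (out : Int) : Decidable (Spec_check_skill skill skill_tree out) := by unfold Spec_check_skill; infer_instance

-- ===== CLAIM (what is proved, stated in full; the proofs are below) =====
def Claim_equal_check_skill : Prop := ∀ (skill : String) (skill_tree : String), Dom_check_skill skill skill_tree → Spec_check_skill skill skill_tree (check_skill skill skill_tree)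

-- ===== LEMMAS AND PROOFS =====

-- ===== VERDICT (by name: the statement is the Claim_ definition above) =====
-- the lockstep loop returns 1 exactly when one list is a prefix of the other
theorem check_skill_loop_eq (as bs : List Char) :
    check_skill_loop as bs
      = if PySem.Chars.startswith as bs || PySem.Chars.startswith bs as then 1 else 0 := by
  induction as generalizing bs with
  | nil =>
    cases bs <;> simp [check_skill_loop, PySem.Chars.startswith]
  | cons a as ih =>
    cases bs with
    | nil => simp [check_skill_loop, PySem.Chars.startswith]
    | cons b bs =>
      by_cases h : a = b
      · subst h
        simp [check_skill_loop, ih, PySem.Chars.startswith]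
      · simp [check_skill_loop, h, PySem.Chars.startswith, Ne.symm h]

theorem check_skill_spec : Claim_equal_check_skill := by
  intro skill skill_tree _
  unfold Spec_check_skill check_skill check_skill_alt
  simp only [PySem.Str.startswith_eq, String.toList_ofList]
  rcases hq : skill_tree.toList.filter (fun s => PySem.Str.isIn (String.ofList [s]) skill) with _ | ⟨c, cs⟩
  · simp [PySem.Chars.startswith]
  · simp only [reduceCtorEq, check_skill_loop_eq]
    simp
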